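-- pv_equiv track=rewrite | github.com/thecyberwar/phishlens | phishlens/utils.py | is_allowlisted
-- ===== SOURCE A (Python) =====
-- def is_allowlisted(domain: str, allowlist: set[str]) -> bool:
--     d = (domain or "").strip().lower()
--     if not d:
--         return False
--
--     if d in allowlist:
--         return True
--
--     for item in allowlist:
--         v = (item or "").strip().lower()
--         if not v:
--             continue
--
--         if v.startswith("*."):
--             suffix = v[2:]
--             if not suffix:
--                 continue
--             if d == suffix or d.endswith("." + suffix):
--                 return True
--
--     return False
-- ===== SOURCE B (Python) =====
-- def is_allowlisted(domain: str, allowlist: set[str]) -> bool: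
--     d = (domain or "").strip().lower()
--     if not d:
--         return False
--
--     if d in allowlist:
--         return True
--
--     # build the set of normalized wildcard suffixes once
--     wild = set()
--     for item in allowlist:
--         v = item.strip().lower()
--         suf = v[2:]
--         if v.startswith("*.") and suf:
--             wild.add(suf)
--
--     # walk the domain's dot-separated tails: d, then the part after each dot
--     cand = d
--     while True:
--         if cand in wild:
--             return True
--         i = cand.find(".")
--         if i < 0:
--             return False
--         cand = cand[i + 1:]
-- ===== Notes on version B (the rewrite author's own statement) =====
-- stated objective: alternative
-- what changed: Instead of scanning the allowlist and testing each wildcard entry against the domain with endswith, B builds the set of normalized wildcard suffixes once and walks the domain's dot-separated tails, probing each tail against that set.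
import Mathlib
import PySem

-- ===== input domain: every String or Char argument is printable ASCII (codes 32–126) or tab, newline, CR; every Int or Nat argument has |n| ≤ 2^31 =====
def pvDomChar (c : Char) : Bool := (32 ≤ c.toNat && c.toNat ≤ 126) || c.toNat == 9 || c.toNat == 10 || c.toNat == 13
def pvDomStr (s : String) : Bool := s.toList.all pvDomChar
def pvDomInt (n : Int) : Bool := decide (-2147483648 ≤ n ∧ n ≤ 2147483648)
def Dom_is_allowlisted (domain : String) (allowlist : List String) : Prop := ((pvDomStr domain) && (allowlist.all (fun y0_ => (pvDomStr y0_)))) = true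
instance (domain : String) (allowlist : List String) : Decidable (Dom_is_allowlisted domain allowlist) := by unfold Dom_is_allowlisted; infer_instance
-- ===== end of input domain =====

-- B replaces A's per-item wildcard matching by a prebuilt set of normalized wildcard
-- suffixes probed with the domain's dot-separated tails (alternative decomposition).

-- shared normalization: (s).strip().lower(), on code points
def pvNorm (s : String) : List Char :=
  PySem.Chars.lower (PySem.Chars.strip s.toList)

-- ===== PORT A =====
-- the for-loop over the allowlist, with A's early return
def pvALoop (d : List Char) : List String → Bool
  | [] => false
  | item :: rest =>
    let v := pvNorm (if item = "" then "" else item)      -- (item or "").strip().lower()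
    if v = [] then pvALoop d rest
    else if PySem.Chars.startswith v ['*', '.'] then
      let suffix := PySem.List.slice v (some 2) none      -- v[2:]
      if suffix = [] then pvALoop d rest
      else if d = suffix || PySem.Chars.endswith d ('.' :: suffix) then true
      else pvALoop d rest
    else pvALoop d rest

def is_allowlisted (domain : String) (allowlist : List String) : Bool :=
  let d := pvNorm (if domain = "" then "" else domain)    -- (domain or "").strip().lower()
  if d = [] then false
  else if allowlist.contains (String.ofList d) then true      -- d in allowlist
  else pvALoop d allowlist

-- ===== PORT B =====
-- the set of normalized wildcard suffixes, built once
def pvWild (allowlist : List String) : PySem.Set (List Char) :=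
  allowlist.foldl
    (fun s item =>
      let v := pvNorm item                                -- item.strip().lower()
      let suf := PySem.List.slice v (some 2) none         -- v[2:]
      if PySem.Chars.startswith v ['*', '.'] && decide (suf ≠ []) then PySem.Set.add s suf
      else s)
    PySem.Set.empty

-- cand.find(".") / cand[i+1:] combined: the tail after the FIRST dot, none = no dot
def pvDropDot : List Char → Option (List Char)
  | [] => none
  | c :: rest => if c = '.' then some rest else pvDropDot rest

theorem pvDropDot_length : ∀ (cs r : List Char), pvDropDot cs = some r → r.length < cs.length := by
  intro cs
  induction cs with
  | nil => intro r h; simp [pvDropDot] at h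
  | cons c t ih =>
    intro r h
    by_cases hc : c = '.'
    · simp [pvDropDot, hc] at h; subst h; simp
    · simp [pvDropDot, hc] at h
      exact Nat.lt_trans (ih r h) (by simp)

-- the while-loop over the domain's dot-separated tails
def pvBLoop (wild : PySem.Set (List Char)) (cand : List Char) : Bool :=
  if PySem.Set.contains wild cand then true
  else
    match h : pvDropDot cand with
    | none => false
    | some rest => pvBLoop wild rest
termination_by cand.length
decreasing_by exact pvDropDot_length cand rest h

def is_allowlisted_alt (domain : String) (allowlist : List String) : Bool :=
  let d := pvNorm (if domain = "" then "" else domain)    -- (domain or "").strip().lower()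
  if d = [] then false
  else if allowlist.contains (String.ofList d) then true      -- d in allowlist
  else pvBLoop (pvWild allowlist) d

-- ===== PRECONDITION & SPEC =====
def Spec_is_allowlisted (domain : String) (allowlist : List String) (out : Bool) : Prop := out = is_allowlisted_alt domain allowlist
instance (domain : String) (allowlist : List String) (out : Bool) : Decidable (Spec_is_allowlisted domain allowlist out) := by unfold Spec_is_allowlisted; infer_instance

-- ===== CLAIM (what is proved, stated in full; the proofs are below) =====
def Claim_equal_is_allowlisted : Prop := ∀ (domain : String) (allowlist : List String), Dom_is_allowlisted domain allowlist → Spec_is_allowlisted domain allowlist (is_allowlisted domain allowlist)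

-- ===== LEMMAS AND PROOFS =====

-- what A's loop tests for a single allowlist item
def pvHit (d : List Char) (item : String) : Prop :=
  PySem.Chars.startswith (pvNorm item) ['*', '.'] = true ∧
  PySem.List.slice (pvNorm item) (some 2) none ≠ [] ∧
  (d = PySem.List.slice (pvNorm item) (some 2) none ∨
    PySem.Chars.endswith d ('.' :: PySem.List.slice (pvNorm item) (some 2) none) = true)

theorem pvALoop_iff (d : List Char) (l : List String) :
    pvALoop d l = true ↔ ∃ item ∈ l, pvHit d item := by
  induction l with
  | nil => simp [pvALoop]
  | cons item rest ih =>
    have hitem : (if item = "" then "" else item) = item := by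
      by_cases h : item = "" <;> simp [h]
    constructor
    · intro h
      rw [pvALoop] at h
      simp only [hitem] at h
      split_ifs at h with h1 h2 h3 h4
      · exact (ih.mp h).elim (fun x hx => ⟨x, List.mem_cons_of_mem _ hx.1, hx.2⟩)
      · exact (ih.mp h).elim (fun x hx => ⟨x, List.mem_cons_of_mem _ hx.1, hx.2⟩)
      · refine ⟨item, List.mem_cons_self, h2, h3, ?_⟩
        rcases Bool.or_eq_true _ _ |>.mp h4 with h' | h'
        · exact Or.inl (by exact decide_eq_true_eq.mp h')
        · exact Or.inr h'
      · exact (ih.mp h).elim (fun x hx => ⟨x, List.mem_cons_of_mem _ hx.1, hx.2⟩)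
      · exact (ih.mp h).elim (fun x hx => ⟨x, List.mem_cons_of_mem _ hx.1, hx.2⟩)
    · rintro ⟨x, hx, hhit⟩
      rw [pvALoop]
      simp only [hitem]
      rcases List.mem_cons.mp hx with rfl | hx'
      · obtain ⟨h1, h2, h3⟩ := hhit
        have hv : pvNorm x ≠ [] := by
          intro hv
          rw [hv] at h1
          exact absurd (PySem.Chars.startswith_iff _ _ |>.mp h1) (by simp)
        have hcond : (d = PySem.List.slice (pvNorm x) (some 2) none ||
            PySem.Chars.endswith d ('.' :: PySem.List.slice (pvNorm x) (some 2) none)) = true := by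
          rcases h3 with h | h
          · simp [h]
          · simp [h]
        simp [hv, h1, h2, hcond]
      · have hrest : pvALoop d rest = true := ih.mpr ⟨x, hx', hhit⟩
        split_ifs <;> simp [hrest]

theorem pvContains_add (s : PySem.Set (List Char)) (x y : List Char) :
    PySem.Set.contains (PySem.Set.add s y) x = true ↔ (x = y ∨ PySem.Set.contains s x = true) := by
  simp [PySem.Set.contains, PySem.Set.add]
  split_ifs with hmem
  · constructor
    · exact Or.inr
    · rintro (rfl | h)
      · exact hmem
      · exact h
  · simp [or_comm]

theorem pvWild_mem (l : List String) (x : List Char) :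
    PySem.Set.contains (pvWild l) x = true ↔
      ∃ item ∈ l,
        PySem.Chars.startswith (pvNorm item) ['*', '.'] = true ∧
        PySem.List.slice (pvNorm item) (some 2) none ≠ [] ∧
        x = PySem.List.slice (pvNorm item) (some 2) none := by
  suffices H : ∀ s0 : PySem.Set (List Char),
      PySem.Set.contains (l.foldl
        (fun s item =>
          let v := pvNorm item
          let suf := PySem.List.slice v (some 2) none
          if PySem.Chars.startswith v ['*', '.'] && decide (suf ≠ []) then PySem.Set.add s suf
          else s) s0) x = true ↔
      (PySem.Set.contains s0 x = true ∨
        ∃ item ∈ l,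
          PySem.Chars.startswith (pvNorm item) ['*', '.'] = true ∧
          PySem.List.slice (pvNorm item) (some 2) none ≠ [] ∧
          x = PySem.List.slice (pvNorm item) (some 2) none) by
    rw [pvWild, H PySem.Set.empty]
    simp [PySem.Set.contains, PySem.Set.empty]
  induction l with
  | nil => intro s0; simp
  | cons item rest ih =>
    intro s0
    simp only [List.foldl_cons]
    rw [ih]
    by_cases hcond : (PySem.Chars.startswith (pvNorm item) ['*', '.'] &&
        decide (PySem.List.slice (pvNorm item) (some 2) none ≠ [])) = true
    · simp only [if_pos hcond]
      obtain ⟨h1, h2⟩ : PySem.Chars.startswith (pvNorm item) ['*', '.'] = true ∧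
          PySem.List.slice (pvNorm item) (some 2) none ≠ [] := by
        simpa using hcond
      rw [pvContains_add]
      constructor
      · rintro ((h | h) | h)
        · exact Or.inr ⟨item, List.mem_cons_self, h1, h2, h⟩
        · exact Or.inl h
        · exact Or.inr (let ⟨y, hy, hh⟩ := h; ⟨y, List.mem_cons_of_mem _ hy, hh⟩)
      · rintro (h | ⟨y, hy, hh⟩)
        · exact Or.inl (Or.inr h)
        · rcases List.mem_cons.mp hy with rfl | hy'
          · exact Or.inl (Or.inl hh.2.2)
          · exact Or.inr ⟨y, hy', hh⟩
    · simp only [if_neg hcond]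
      have hno : ¬ (PySem.Chars.startswith (pvNorm item) ['*', '.'] = true ∧
          PySem.List.slice (pvNorm item) (some 2) none ≠ []) := by
        intro ⟨h1, h2⟩; exact hcond (by simp [h1, h2])
      constructor
      · rintro (h | h)
        · exact Or.inl h
        · exact Or.inr (let ⟨y, hy, hh⟩ := h; ⟨y, List.mem_cons_of_mem _ hy, hh⟩)
      · rintro (h | ⟨y, hy, hh⟩)
        · exact Or.inl h
        · rcases List.mem_cons.mp hy with rfl | hy'
          · exact absurd ⟨hh.1, hh.2.1⟩ hno
          · exact Or.inr ⟨y, hy', hh⟩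

theorem pvDropDot_none (cs : List Char) (h : pvDropDot cs = none) :
    ∀ s : List Char, ¬ ('.' :: s <:+ cs) := by
  induction cs with
  | nil => intro s h'; exact absurd (List.IsSuffix.length_le h') (by simp)
  | cons c t ih =>
    intro s h'
    by_cases hc : c = '.'
    · simp [pvDropDot, hc] at h
    · simp only [pvDropDot, if_neg hc] at h
      rcases List.suffix_cons_iff.mp h' with he | ht
      · exact hc (by injection he with h1 _; exact h1.symm)
      · exact ih h s ht

theorem pvDropDot_some (cs : List Char) : ∀ r, pvDropDot cs = some r →
    ∀ s : List Char, ('.' :: s <:+ cs) ↔ (s = r ∨ '.' :: s <:+ r) := by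
  induction cs with
  | nil => intro r h; simp [pvDropDot] at h
  | cons c t ih =>
    intro r h s
    by_cases hc : c = '.'
    · simp only [pvDropDot, if_pos hc] at h
      injection h with h; subst h; subst hc
      rw [List.suffix_cons_iff]
      constructor
      · rintro (he | ht)
        · cases he; exact Or.inl rfl
        · exact Or.inr ht
      · rintro (rfl | ht)
        · exact Or.inl rfl
        · exact Or.inr ht
    · simp only [pvDropDot, if_neg hc] at h
      rw [List.suffix_cons_iff, ih r h s]
      constructor
      · rintro (he | ht)
        · cases he; exact absurd rfl hc
        · exact ht
      · exact Or.inr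

theorem pvBLoop_iff (w : PySem.Set (List Char)) (cs : List Char) :
    pvBLoop w cs = true ↔ ∃ s, (s = cs ∨ '.' :: s <:+ cs) ∧ PySem.Set.contains w s = true := by
  generalize hn : cs.length = n
  induction n using Nat.strong_induction_on generalizing cs with
  | _ n ih =>
    rw [pvBLoop]
    split_ifs with hc
    · exact iff_of_true rfl ⟨cs, Or.inl rfl, hc⟩
    · split
      · rename_i hd
        constructor
        · intro h; exact absurd h (by simp)
        · rintro ⟨s, rfl | hs, hw⟩
          · exact (hc hw).elim
          · exact absurd hs (pvDropDot_none cs hd s)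
      · rename_i r hd
        have hlt : r.length < n := hn ▸ pvDropDot_length cs r hd
        rw [ih r.length hlt r rfl]
        constructor
        · rintro ⟨s, hs, hw⟩
          exact ⟨s, Or.inr ((pvDropDot_some cs r hd s).mpr hs), hw⟩
        · rintro ⟨s, rfl | hs, hw⟩
          · exact (hc hw).elim
          · exact ⟨s, (pvDropDot_some cs r hd s).mp hs, hw⟩

theorem loops_eq (d : List Char) (l : List String) :
    pvALoop d l = pvBLoop (pvWild l) d := by
  rw [Bool.eq_iff_iff, pvALoop_iff, pvBLoop_iff]
  constructor
  · rintro ⟨item, hi, h1, h2, h3⟩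
    refine ⟨PySem.List.slice (pvNorm item) (some 2) none, ?_, (pvWild_mem l _).mpr ⟨item, hi, h1, h2, rfl⟩⟩
    rcases h3 with h | h
    · exact Or.inl h.symm
    · exact Or.inr (PySem.Chars.endswith_iff _ _ |>.mp h)
  · rintro ⟨s, hs, hw⟩
    obtain ⟨item, hi, h1, h2, rfl⟩ := (pvWild_mem l _).mp hw
    refine ⟨item, hi, h1, h2, ?_⟩
    rcases hs with h | h
    · exact Or.inl h.symm
    · exact Or.inr (PySem.Chars.endswith_iff _ _ |>.mpr h)

-- ===== VERDICT (by name: the statement is the Claim_ definition above) =====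
theorem is_allowlisted_spec : Claim_equal_is_allowlisted := by
  intro domain allowlist _
  unfold Spec_is_allowlisted is_allowlisted is_allowlisted_alt
  simp only [loops_eq]
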